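-- pv_equiv track=rewrite | github.com/ningxie1991/FederatedTrust | federatedTrust/utils.py | get_aux_data
-- ===== SOURCE A (Python) =====
-- def get_aux_data(data, x_aux, y_aux, class_num, class_sample_size):
--     """Generates an auxilary dataset with balanced classes
--          :param data: training data of one client
--          :param x_aux: the auxiliary training set
--          :param y_aux: the auxiliary labels
--          :param class_num: the number of classes
--          :param class_sample_size: the desired class sample size
--          :return tuple of (x_aux, y_aux)
--       """
--     x, y = data
--     for i in range(class_num):
--         for (sample, label) in zip(x, y):
--             l = len(x_aux)
--             if (label == i and (len(x_aux) + 1 <= class_sample_size * (i + 1))):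
--                 x_aux.append(sample)
--                 y_aux.append(label)
--
--     return (x_aux, y_aux)
-- ===== SOURCE B (Python) =====
-- def get_aux_data(data, x_aux, y_aux, class_num, class_sample_size):
--     x, y = data
--     buckets = {}
--     for label, sample in zip(y, x):
--         buckets.setdefault(label, []).append(sample)
--     cur = len(x_aux)
--     for i in range(class_num):
--         b = buckets.get(i, [])
--         k = min(len(b), max(0, class_sample_size * (i + 1) - cur))
--         x_aux.extend(b[:k])
--         y_aux.extend([i] * k)
--         cur += k
--     return (x_aux, y_aux)
-- ===== Notes on version B (the rewrite author's own statement) =====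
-- stated objective: faster
-- what changed: B replaces A's class_num full rescans of the data (one per class) by a single pass that buckets samples by label into a dict, then takes a cumulative-capped slice per class in order.
import Mathlib
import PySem

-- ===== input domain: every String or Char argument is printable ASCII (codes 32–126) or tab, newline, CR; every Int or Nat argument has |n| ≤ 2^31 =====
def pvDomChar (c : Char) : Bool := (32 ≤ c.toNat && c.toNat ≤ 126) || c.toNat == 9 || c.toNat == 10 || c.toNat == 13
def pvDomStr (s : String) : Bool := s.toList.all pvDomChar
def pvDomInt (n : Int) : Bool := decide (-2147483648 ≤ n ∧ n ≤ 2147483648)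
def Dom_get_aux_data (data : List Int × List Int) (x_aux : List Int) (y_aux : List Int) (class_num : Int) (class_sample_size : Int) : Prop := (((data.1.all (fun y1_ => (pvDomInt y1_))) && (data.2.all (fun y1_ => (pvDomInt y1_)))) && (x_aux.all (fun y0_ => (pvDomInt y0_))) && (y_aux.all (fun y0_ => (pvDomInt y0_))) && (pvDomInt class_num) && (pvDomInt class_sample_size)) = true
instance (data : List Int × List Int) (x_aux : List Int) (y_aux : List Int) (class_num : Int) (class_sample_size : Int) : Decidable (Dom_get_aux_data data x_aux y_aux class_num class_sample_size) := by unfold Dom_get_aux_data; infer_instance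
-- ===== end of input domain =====

-- B replaces A's per-class full rescans of the data by one bucketing pass plus a capped slice per
-- class (objective: faster). Both A and B mutate x_aux/y_aux in place identically (appends); the
-- equivalence proved here is about the returned value.

-- ===== PORT A =====
-- A: for i in range(class_num): for (sample,label) in zip(x,y): conditional append to both aux lists.
-- (the local `l = len(x_aux)` in A is dead code and is not ported)
def get_aux_data (data : List Int × List Int) (x_aux : List Int) (y_aux : List Int) (class_num : Int) (class_sample_size : Int) : List Int × List Int :=
  (PySem.List.pyRange 0 class_num 1).foldl
    (fun (st : List Int × List Int) i =>
      (data.1.zip data.2).foldl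
        (fun (st : List Int × List Int) p =>
          if p.2 = i ∧ (st.1.length : Int) + 1 ≤ class_sample_size * (i + 1)
          then (st.1 ++ [p.1], st.2 ++ [p.2])
          else st) st)
    (x_aux, y_aux)

-- ===== PORT B =====
-- B: one pass building buckets[label] (setdefault(label, []).append(sample) = Dict.modify label [] (· ++ [sample])),
-- then for i in range(class_num) extend by a capped slice of the bucket; cur tracks len(x_aux).
def get_aux_data_alt (data : List Int × List Int) (x_aux : List Int) (y_aux : List Int) (class_num : Int) (class_sample_size : Int) : List Int × List Int :=
  let buckets : PySem.Dict Int (List Int) :=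
    (data.2.zip data.1).foldl (fun d p => d.modify p.1 [] (· ++ [p.2])) PySem.Dict.empty
  let st := (PySem.List.pyRange 0 class_num 1).foldl
    (fun (st : List Int × List Int × Int) i =>
      let b := buckets.getD i []
      -- k = min(len(b), max(0, class_sample_size*(i+1) - cur)); Int.toNat is max(0, ·)
      let k := min b.length (class_sample_size * (i + 1) - st.2.2).toNat
      -- b[:k] with 0 ≤ k is List.take k b; [i]*k is List.replicate k i
      (st.1 ++ b.take k, st.2.1 ++ List.replicate k i, st.2.2 + (k : Int)))
    (x_aux, y_aux, (x_aux.length : Int))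
  (st.1, st.2.1)

-- ===== PRECONDITION & SPEC =====
def Spec_get_aux_data (data : List Int × List Int) (x_aux : List Int) (y_aux : List Int) (class_num : Int) (class_sample_size : Int) (out : List Int × List Int) : Prop := out = get_aux_data_alt data x_aux y_aux class_num class_sample_size
instance (data : List Int × List Int) (x_aux : List Int) (y_aux : List Int) (class_num : Int) (class_sample_size : Int) (out : List Int × List Int) : Decidable (Spec_get_aux_data data x_aux y_aux class_num class_sample_size out) := by unfold Spec_get_aux_data; infer_instance

-- ===== CLAIM (what is proved, stated in full; the proofs are below) =====
def Claim_equal_get_aux_data : Prop := ∀ (data : List Int × List Int) (x_aux : List Int) (y_aux : List Int) (class_num : Int) (class_sample_size : Int), Dom_get_aux_data data x_aux y_aux class_num class_sample_size → Spec_get_aux_data data x_aux y_aux class_num class_sample_size (get_aux_data data x_aux y_aux class_num class_sample_size)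

-- ===== LEMMAS AND PROOFS =====

-- samples whose label is i, in data order
def pvBucket (x y : List Int) (i : Int) : List Int :=
  ((x.zip y).filter (fun p => p.2 == i)).map (·.1)

-- B's dict lookup returns exactly the bucket
theorem pvBuckets_getD (x y : List Int) (i : Int) :
    (((y.zip x).foldl (fun (d : PySem.Dict Int (List Int)) p => d.modify p.1 [] (· ++ [p.2]))
        PySem.Dict.empty).getD i []) = pvBucket x y i := by
  rw [PySem.Dict.getD_foldl_modify_append]
  simp only [PySem.Dict.getD_empty, List.nil_append, pvBucket]
  induction x generalizing y with
  | nil => cases y <;> simp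
  | cons a x ih => cases y with
    | nil => simp
    | cons b y => by_cases hb : b = i <;> simp [hb, ih]

-- characterisation of A's inner scan for class i
theorem pvInner (L : List (Int × Int)) (i C : Int) (xa ya : List Int) :
    L.foldl (fun (st : List Int × List Int) p =>
        if p.2 = i ∧ (st.1.length : Int) + 1 ≤ C
        then (st.1 ++ [p.1], st.2 ++ [p.2]) else st) (xa, ya)
    = (xa ++ ((L.filter (fun p => p.2 == i)).map (·.1)).take (C - xa.length).toNat,
       ya ++ List.replicate (((L.filter (fun p => p.2 == i)).map (·.1)).take (C - xa.length).toNat).length i) := by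
  induction L generalizing xa ya with
  | nil => simp
  | cons p L ih =>
    simp only [List.foldl_cons]
    by_cases hp : p.2 = i
    · by_cases hc : (xa.length : Int) + 1 ≤ C
      · have ht : (C - xa.length).toNat = ((C - ((xa : List Int).length + 1)).toNat) + 1 := by omega
        rw [if_pos (⟨hp, hc⟩ : p.2 = i ∧ (xa.length : Int) + 1 ≤ C), ih,
          List.filter_cons_of_pos (by simpa using hp)]
        simp only [List.map_cons, ht, List.take_succ_cons, List.length_append,
          List.length_nil, Nat.zero_add, hp, List.length_cons, List.replicate_succ]
        push_cast
        simp [List.append_assoc]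
      · have ht : (C - xa.length).toNat = 0 := by omega
        rw [if_neg (fun h => hc h.2), ih, List.filter_cons_of_pos (by simpa using hp)]
        simp [ht]
    · rw [if_neg (fun h => hp h.1), List.filter_cons_of_neg (by simpa using hp)]
      exact ih xa ya

-- the two fold shapes agree, given cur = len(x_aux)
theorem pvFolds (f : Int → List Int) (css : Int) (is : List Int) (xa ya : List Int) (cur : Int)
    (h : cur = (xa.length : Int)) :
    (is.foldl (fun (st : List Int × List Int × Int) i =>
        let b := f i
        let k := min b.length (css * (i + 1) - st.2.2).toNat
        (st.1 ++ b.take k, st.2.1 ++ List.replicate k i, st.2.2 + (k : Int))) (xa, ya, cur))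
    = ((is.foldl (fun (st : List Int × List Int) i =>
          (st.1 ++ (f i).take (css * (i + 1) - st.1.length).toNat,
           st.2 ++ List.replicate (((f i).take (css * (i + 1) - st.1.length).toNat).length) i)) (xa, ya)).1,
       (is.foldl (fun (st : List Int × List Int) i =>
          (st.1 ++ (f i).take (css * (i + 1) - st.1.length).toNat,
           st.2 ++ List.replicate (((f i).take (css * (i + 1) - st.1.length).toNat).length) i)) (xa, ya)).2,
       (((is.foldl (fun (st : List Int × List Int) i =>
          (st.1 ++ (f i).take (css * (i + 1) - st.1.length).toNat,
           st.2 ++ List.replicate (((f i).take (css * (i + 1) - st.1.length).toNat).length) i)) (xa, ya)).1.length : Int))) := by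
  induction is generalizing xa ya cur with
  | nil => simp [h]
  | cons i is ih =>
    simp only [List.foldl_cons]
    have hk : min (f i).length (css * (i + 1) - cur).toNat
        = ((f i).take (css * (i + 1) - xa.length).toNat).length := by
      simp [List.length_take, h, Nat.min_comm]
    have htake : (f i).take (min (f i).length (css * (i + 1) - cur).toNat)
        = (f i).take (css * (i + 1) - xa.length).toNat := by
      rw [h, Nat.min_comm, ← List.take_take, List.take_length]
    rw [htake]
    simp only [hk]
    exact ih _ _ _ (by simp [h])

-- ===== VERDICT (by name: the statement is the Claim_ definition above) =====
theorem get_aux_data_spec : Claim_equal_get_aux_data := by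
  intro data x_aux y_aux class_num class_sample_size _
  unfold Spec_get_aux_data get_aux_data get_aux_data_alt
  obtain ⟨x, y⟩ := data
  simp only
  rw [pvFolds (fun i =>
        (((y.zip x).foldl (fun (d : PySem.Dict Int (List Int)) p => d.modify p.1 [] (· ++ [p.2]))
          PySem.Dict.empty).getD i [])) class_sample_size _ x_aux y_aux _ rfl]
  simp only [pvBuckets_getD]
  rw [Prod.mk.eta]
  refine List.foldl_ext _ _ _ ?_
  intro st i _
  obtain ⟨xa, ya⟩ := st
  rw [pvInner]
  simp [pvBucket]
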